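-- pv_equiv track=rewrite | github.com/jk-jung/problem-solving | codewars/6kyu/6_Infected Zeroes.py | infected_zeroes
-- ===== SOURCE A (Python) =====
-- def infected_zeroes(v):
--     n = len(v)
--     r = [1 << 30 for _ in range(n)]
--     pos = -1
--     for i in range(n):
--         if v[i] == 0:
--             pos = i
--             r[i] = 0
--         if v[i] and pos != -1: r[i] = min(r[i], i - pos)
--     pos = -1
--     for i in range(n - 1, -1, -1):
--         if v[i] == 0: pos = i
--         if v[i] and pos != -1: r[i] = min(r[i], pos - i)
--     return max(r)
-- ===== SOURCE B (Python) =====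
-- def infected_zeroes(v):
--     n = len(v)
--     zeros = [j for j, x in enumerate(v) if x == 0]
--     if not zeros:
--         return 1 << 30  # no zero anywhere: the sentinel distance
--     gaps = [(b - a) // 2 for a, b in zip(zeros, zeros[1:])]
--     # reported distances are capped at the 1 << 30 sentinel, as in the no-zero case
--     return min(max([zeros[0], (n - 1) - zeros[-1]] + gaps), 1 << 30)
-- ===== Notes on version B (the rewrite author's own statement) =====
-- stated objective: alternative
-- what changed: Replaces the two index-relaxation passes over a mutable distance array by a single comprehension collecting the zero positions, from which the answer is the maximum of the prefix length, the suffix length and the half-gaps between consecutive zeros (capped at A's 1<<30 sentinel, which A applies to every reported distance).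
import Mathlib
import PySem

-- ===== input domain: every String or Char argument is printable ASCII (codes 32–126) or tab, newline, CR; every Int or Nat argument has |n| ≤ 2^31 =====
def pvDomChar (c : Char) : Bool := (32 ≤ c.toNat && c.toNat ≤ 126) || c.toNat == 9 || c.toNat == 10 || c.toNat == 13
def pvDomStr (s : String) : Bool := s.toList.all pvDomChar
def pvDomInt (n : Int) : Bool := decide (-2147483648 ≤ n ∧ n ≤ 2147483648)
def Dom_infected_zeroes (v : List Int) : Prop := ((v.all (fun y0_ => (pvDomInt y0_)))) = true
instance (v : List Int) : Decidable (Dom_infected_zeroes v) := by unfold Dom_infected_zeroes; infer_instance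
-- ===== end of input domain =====

-- B replaces A's two relaxation passes over a mutable distance array by a zero-position list and a gap maximum over it; same return value on every non-empty list.


-- ===== PORT A =====
-- forward-pass step: 'if v[i]==0: pos=i; r[i]=0' then 'if v[i] and pos != -1: r[i]=min(r[i], i-pos)'
def izStepF (v : List Int) (st : List Int × Int) (i : Int) : List Int × Int :=
  let r := st.1
  let pos := st.2
  let rp := if PySem.List.pyGetD v i 0 = 0 then (PySem.List.pySetD r i 0, i) else (r, pos)
  let r := rp.1
  let pos := rp.2
  let r := if PySem.List.pyGetD v i 0 ≠ 0 ∧ pos ≠ -1 then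
             PySem.List.pySetD r i (min (PySem.List.pyGetD r i 0) (i - pos)) else r
  (r, pos)

-- backward-pass step: 'if v[i]==0: pos=i' then 'if v[i] and pos != -1: r[i]=min(r[i], pos-i)'
def izStepB (v : List Int) (st : List Int × Int) (i : Int) : List Int × Int :=
  let r := st.1
  let pos := if PySem.List.pyGetD v i 0 = 0 then i else st.2
  let r := if PySem.List.pyGetD v i 0 ≠ 0 ∧ pos ≠ -1 then
             PySem.List.pySetD r i (min (PySem.List.pyGetD r i 0) (pos - i)) else r
  (r, pos)

def infected_zeroes (v : List Int) : Int :=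
  let n : Int := (v.length : Int)
  let r : List Int := (PySem.List.pyRange 0 n 1).map (fun _ => ((1 <<< 30 : Int)))
  let st1 := (PySem.List.pyRange 0 n 1).foldl (izStepF v) (r, -1)
  let st2 := (PySem.List.pyRange (n - 1) (-1) (-1)).foldl (izStepB v) (st1.1, -1)
  -- max(r) raises ValueError on the empty list; Pre_ excludes it, the 0 default is unreachable
  match PySem.List.max? st2.1 (fun y => y) with
  | some m => m
  | none => 0

-- ===== PORT B =====
def infected_zeroes_alt (v : List Int) : Int :=
  let n : Int := (v.length : Int)
  let zeros : List Int := ((PySem.List.enumerate v).filter (fun p => p.2 == 0)).map (fun p => p.1)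
  if zeros = [] then (1 <<< 30 : Int)
  else
    let gaps : List Int :=
      (zeros.zip (PySem.List.slice zeros (some 1) none)).map
        (fun ab => PySem.Int.floordiv (ab.2 - ab.1) 2)
    let cands : List Int := PySem.List.pyGetD zeros 0 0 :: ((n - 1) - PySem.List.pyGetD zeros (-1) 0) :: gaps
    -- max of the nonempty candidate list; the 0 default is unreachable
    min (match PySem.List.max? cands (fun y => y) with | some m => m | none => 0) (1 <<< 30)

-- ===== PRECONDITION & SPEC =====
-- Pre_ excludes exactly the empty list, on which A's 'max(r)' raises ValueError.
def Pre_infected_zeroes (v : List Int) : Prop := v ≠ []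
instance (v : List Int) : Decidable (Pre_infected_zeroes v) := by unfold Pre_infected_zeroes; infer_instance
def pvWitness_infected_zeroes : List Int := [3, 0, 5]

def Spec_infected_zeroes (v : List Int) (out : Int) : Prop := out = infected_zeroes_alt v
instance (v : List Int) (out : Int) : Decidable (Spec_infected_zeroes v out) := by unfold Spec_infected_zeroes; infer_instance

-- ===== CLAIM (what is proved, stated in full; the proofs are below) =====
def Claim_equal_infected_zeroes : Prop := ∀ (v : List Int), Dom_infected_zeroes v → Pre_infected_zeroes v → Spec_infected_zeroes v (infected_zeroes v)

-- ===== LEMMAS AND PROOFS =====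

-- the sentinel as a numeral
theorem izC_eq : (1 <<< 30 : Int) = 1073741824 := by decide

-- index of the last zero among v[0..m-1], -1 if none (what 'pos' holds in A's forward pass)
def izLZ (v : List Int) : Nat → Int
  | 0 => -1
  | m+1 => if v.getD m 0 = 0 then (m : Int) else izLZ v m

-- index of the first zero among v[m..], -1 if none (what 'pos' holds in A's backward pass)
def izNZ (v : List Int) (m : Nat) : Int :=
  if h : m < v.length then (if v.getD m 0 = 0 then (m : Int) else izNZ v (m+1)) else -1
termination_by v.length - m

-- value of r[i] after the forward pass
def izFwd (v : List Int) (i : Nat) : Int :=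
  if izLZ v (i+1) = -1 then (1 <<< 30) else min (1 <<< 30) ((i : Int) - izLZ v (i+1))

-- value of r[i] after both passes
def izB (v : List Int) (i : Nat) : Int :=
  if izNZ v i = -1 then izFwd v i else min (izFwd v i) (izNZ v i - (i : Int))

-- uncapped distance of i to the nearest zero (meaningful when a zero exists)
def izD (v : List Int) (i : Nat) : Int :=
  if izLZ v (i+1) = -1 then izNZ v i - (i : Int)
  else if izNZ v i = -1 then (i : Int) - izLZ v (i+1)
  else min ((i : Int) - izLZ v (i+1)) (izNZ v i - (i : Int))

-- the r array after processing the first m indices of the forward pass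
def izArrF (v : List Int) (m : Nat) : List Int :=
  (List.range v.length).map (fun i => if i < m then izFwd v i else (1 <<< 30))

-- the r array once the backward pass has processed all indices ≥ m
def izArrB (v : List Int) (m : Nat) : List Int :=
  (List.range v.length).map (fun i => if m ≤ i then izB v i else izFwd v i)

-- B's zero-position list
def izZ (v : List Int) : List Int :=
  ((PySem.List.enumerate v).filter (fun p => p.2 == 0)).map (fun p => p.1)

theorem izLZ_cases (v : List Int) (m : Nat) :
    izLZ v m = -1 ∨ ∃ p : Nat, izLZ v m = (p : Int) ∧ p < m ∧ v.getD p 0 = 0 := by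
  induction m with
  | zero => exact Or.inl rfl
  | succ m ih =>
    by_cases hz : v.getD m 0 = 0
    · exact Or.inr ⟨m, by simp only [izLZ]; rw [if_pos hz], Nat.lt_succ_self m, hz⟩
    · rcases ih with h | ⟨p, hp, hpm, hpz⟩
      · exact Or.inl (by simp only [izLZ]; rw [if_neg hz]; exact h)
      · exact Or.inr ⟨p, by simp only [izLZ]; rw [if_neg hz]; exact hp, by omega, hpz⟩

theorem izLZ_ge (v : List Int) {m j : Nat} (hj : j < m) (hz : v.getD j 0 = 0) :
    (j : Int) ≤ izLZ v m := by
  induction m with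
  | zero => omega
  | succ m ih =>
    by_cases hm : v.getD m 0 = 0
    · simp only [izLZ]
      rw [if_pos hm]
      omega
    · have hjm : j < m := by
        rcases Nat.lt_succ_iff_lt_or_eq.mp hj with h | h
        · exact h
        · exact absurd (h ▸ hz) hm
      simp only [izLZ]
      rw [if_neg hm]
      exact ih hjm

theorem izNZ_cases (v : List Int) (m : Nat) :
    izNZ v m = -1 ∨ ∃ q : Nat, izNZ v m = (q : Int) ∧ m ≤ q ∧ q < v.length ∧ v.getD q 0 = 0 := by
  rw [izNZ]
  split
  · rename_i hlt
    split
    · rename_i hz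
      exact Or.inr ⟨m, rfl, le_refl m, hlt, hz⟩
    · rcases izNZ_cases v (m+1) with h | ⟨q, hq, hmq, hql, hqz⟩
      · exact Or.inl h
      · exact Or.inr ⟨q, hq, by omega, hql, hqz⟩
  · exact Or.inl rfl
termination_by v.length - m

theorem izNZ_le (v : List Int) {m j : Nat} (hmj : m ≤ j) (hj : j < v.length)
    (hz : v.getD j 0 = 0) : izNZ v m ≠ -1 ∧ izNZ v m ≤ (j : Int) := by
  rw [izNZ]
  have hlt : m < v.length := by omega
  rw [dif_pos hlt]
  split
  · constructor
    · omega
    · omega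
  · rename_i hm
    have hmj' : m + 1 ≤ j := by
      rcases Nat.eq_or_lt_of_le hmj with h | h
      · exact absurd (h ▸ hz) hm
      · omega
    exact izNZ_le v hmj' hj hz
termination_by v.length - m

theorem izNZ_len (v : List Int) : izNZ v v.length = -1 := by
  rw [izNZ]
  simp

theorem mem_izZ (v : List Int) (z : Int) :
    z ∈ izZ v ↔ ∃ k : Nat, k < v.length ∧ z = (k : Int) ∧ v.getD k 0 = 0 := by
  simp only [izZ, List.mem_map, List.mem_filter, PySem.List.mem_enumerate_iff]
  constructor
  · rintro ⟨⟨z1, x⟩, ⟨⟨k, hk, heq⟩, hx⟩, rfl⟩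
    obtain ⟨h1, h2⟩ := Prod.mk.injEq .. ▸ heq
    refine ⟨k, hk, by simpa using h1, ?_⟩
    have : x = 0 := by simpa using hx
    rw [List.getD_eq_getElem v 0 hk, ← h2, this]
  · rintro ⟨k, hk, rfl, hz⟩
    refine ⟨((k : Int), v[k]), ⟨⟨k, hk, by simp⟩, ?_⟩, rfl⟩
    rw [List.getD_eq_getElem v 0 hk] at hz
    simpa using hz

theorem izZ_pairwise (v : List Int) : (izZ v).Pairwise (· < ·) := by
  have h1 := PySem.List.pairwise_lt_enumerate (xs := v) (s := 0)
  have h2 := h1.filter (fun p => p.2 == 0)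
  exact List.pairwise_map.mpr h2

-- in a strictly increasing list every element is at most the last one
theorem pairwise_le_getLast {l : List Int} (hp : l.Pairwise (· < ·)) (h : l ≠ [])
    {x : Int} (hx : x ∈ l) : x ≤ l.getLast h := by
  induction l with
  | nil => exact absurd rfl h
  | cons a t ih =>
    rcases List.pairwise_cons.mp hp with ⟨ha, hp'⟩
    cases t with
    | nil => simp_all
    | cons b t' =>
      rw [List.getLast_cons (by simp)]
      rcases List.mem_cons.mp hx with rfl | hx'
      · exact le_of_lt (ha _ (List.getLast_mem _))
      · exact ih hp' (by simp) hx' 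

-- two members of a strictly increasing list with nothing strictly between are adjacent
theorem pairwise_adj {l : List Int} (hp : l.Pairwise (· < ·)) {p q : Int}
    (hpm : p ∈ l) (hqm : q ∈ l) (hpq : p < q)
    (hno : ∀ z ∈ l, ¬(p < z ∧ z < q)) : (p, q) ∈ l.zip l.tail := by
  induction l with
  | nil => exact absurd hpm (by simp)
  | cons a t ih =>
    rcases List.pairwise_cons.mp hp with ⟨ha, hp'⟩
    cases t with
    | nil =>
      have : p = a := by simpa using hpm
      have : q = a := by simpa using hqm
      omega
    | cons b t' =>
      rcases List.mem_cons.mp hpm with rfl | hpm'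
      · -- p = a; show q = b
        have hqt : q ∈ b :: t' := by
          rcases List.mem_cons.mp hqm with rfl | h
          · omega
          · exact h
        have hab : p < b := ha _ (by simp)
        have hbq : ¬(p < b ∧ b < q) := hno b (by simp)
        have hq : q = b := by
          rcases List.mem_cons.mp hqt with rfl | h
          · rfl
          · have := (List.pairwise_cons.mp hp').1 _ h
            omega
        subst hq
        simp [List.zip_cons_cons]
      · have hqt : q ∈ b :: t' := by
          rcases List.mem_cons.mp hqm with rfl | h
          · have := ha _ hpm'
            omega
          · exact h
        have := ih hp' hpm' hqt (fun z hz => hno z (List.mem_cons_of_mem _ hz))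
        simp only [List.tail_cons] at this ⊢
        cases t' with
        | nil => simp_all
        | cons c t'' => exact List.mem_cons_of_mem _ this

-- an adjacent pair of a strictly increasing list has nothing strictly between
theorem adj_no_between {l : List Int} (hp : l.Pairwise (· < ·)) {a b : Int}
    (hab : (a, b) ∈ l.zip l.tail) : a < b ∧ ∀ z ∈ l, ¬(a < z ∧ z < b) := by
  rcases List.mem_iff_getElem.mp hab with ⟨j, hj, hjeq⟩
  have hjl : j + 1 < l.length := by
    have := hj
    simp [List.length_zip, List.length_tail] at this
    omega
  have hget : l[j]'(by omega) = a ∧ l.tail[j]'(by simpa [List.length_tail] using by omega) = b := by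
    have := hjeq
    rw [List.getElem_zip] at this
    exact ⟨congrArg Prod.fst this, congrArg Prod.snd this⟩
  have hga : l[j]'(by omega) = a := hget.1
  have hgb : l[j+1]'hjl = b := by
    have := hget.2
    rwa [List.getElem_tail] at this
  have hmono := List.pairwise_iff_getElem.mp hp
  constructor
  · have := hmono j (j+1) (by omega) hjl (by omega)
    rwa [hga, hgb] at this
  · rintro z hz ⟨h1, h2⟩
    rcases List.mem_iff_getElem.mp hz with ⟨k, hk, rfl⟩
    rcases lt_trichotomy k j with h | h | h
    · have := hmono k j hk (by omega) h
      omega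
    · subst h; omega
    · rcases Nat.eq_or_lt_of_le (Nat.succ_le_of_lt h) with h' | h'
      · subst h'
        simp only [Nat.succ_eq_add_one] at h2
        rw [hgb] at h2
        omega
      · have := hmono (j+1) k hjl hk h'
        omega

theorem izArrF_get (v : List Int) {m : Nat} (hm : m < v.length) :
    (izArrF v m).getD m 0 = (1 <<< 30) := by
  rw [List.getD_eq_getElem _ _ (by simpa [izArrF] using hm)]
  simp [izArrF]

theorem izArrB_get (v : List Int) {m : Nat} (hm : m < v.length) :
    (izArrB v (m+1)).getD m 0 = izFwd v m := by
  rw [List.getD_eq_getElem _ _ (by simpa [izArrB] using hm)]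
  simp [izArrB]

theorem izArrF_set (v : List Int) {m : Nat} (_hm : m < v.length) {x : Int}
    (hx : x = izFwd v m) :
    (izArrF v m).set m x = izArrF v (m+1) := by
  apply List.ext_getElem (by simp [izArrF])
  intro i h1 h2
  simp only [izArrF, List.getElem_set, List.getElem_map, List.getElem_range]
  have hi : i < v.length := by simpa [izArrF] using h2
  by_cases him : m = i
  · subst him
    rw [if_pos rfl, if_pos (by omega), hx]
  · rw [if_neg him]
    by_cases hlt : i < m
    · rw [if_pos hlt, if_pos (by omega)]
    · rw [if_neg hlt, if_neg (by omega)]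

theorem izArrF_succ_const (v : List Int) {m : Nat} (h : izFwd v m = (1 <<< 30)) :
    izArrF v (m+1) = izArrF v m := by
  apply List.ext_getElem (by simp [izArrF])
  intro i h1 h2
  simp only [izArrF, List.getElem_map, List.getElem_range]
  by_cases him : i = m
  · subst him
    rw [if_pos (by omega), if_neg (by omega), h]
  · by_cases hlt : i < m
    · rw [if_pos (by omega), if_pos hlt]
    · rw [if_neg (by omega), if_neg hlt]

theorem izArrB_set (v : List Int) {m : Nat} (_hm : m < v.length) {x : Int}
    (hx : x = izB v m) :
    (izArrB v (m+1)).set m x = izArrB v m := by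
  apply List.ext_getElem (by simp [izArrB])
  intro i h1 h2
  simp only [izArrB, List.getElem_set, List.getElem_map, List.getElem_range]
  by_cases him : m = i
  · subst him
    rw [if_pos rfl, if_pos (by omega), hx]
  · rw [if_neg him]
    by_cases hle : m + 1 ≤ i
    · rw [if_pos hle, if_pos (by omega)]
    · rw [if_neg hle, if_neg (by omega)]

theorem izArrB_pred_const (v : List Int) {m : Nat} (h : izB v m = izFwd v m) :
    izArrB v m = izArrB v (m+1) := by
  apply List.ext_getElem (by simp [izArrB])
  intro i h1 h2
  simp only [izArrB, List.getElem_map, List.getElem_range]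
  by_cases him : i = m
  · subst him
    rw [if_pos (by omega), if_neg (by omega), h]
  · by_cases hle : m ≤ i
    · rw [if_pos hle, if_pos (by omega)]
    · rw [if_neg hle, if_neg (by omega)]

theorem izArrFB (v : List Int) : izArrF v v.length = izArrB v v.length := by
  apply List.ext_getElem (by simp [izArrF, izArrB])
  intro i h1 h2
  have hi : i < v.length := by simpa [izArrF] using h1
  simp only [izArrF, izArrB, List.getElem_map, List.getElem_range]
  rw [if_pos hi, if_neg (by omega)]

theorem izArrB_zero (v : List Int) :
    izArrB v 0 = (List.range v.length).map (fun i => izB v i) := by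
  simp [izArrB]

theorem izFwd_of_zero (v : List Int) {m : Nat} (hz : v.getD m 0 = 0) : izFwd v m = 0 := by
  have hlz : izLZ v (m+1) = (m : Int) := by
    simp only [izLZ]; rw [if_pos hz]
  rw [izFwd, hlz, if_neg (by omega)]
  have : (m : Int) - m = 0 := by omega
  rw [this, izC_eq]
  omega

theorem izLZ_succ_of_ne (v : List Int) {m : Nat} (hz : ¬ v.getD m 0 = 0) :
    izLZ v (m+1) = izLZ v m := by
  simp only [izLZ]; rw [if_neg hz]

-- forward pass: A's first loop computes izArrF and izLZ
theorem izFoldF (v : List Int) (m : Nat) (hm : m ≤ v.length) :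
    (PySem.List.pyRange 0 (m : Int) 1).foldl (izStepF v) (izArrF v 0, -1)
      = (izArrF v m, izLZ v m) := by
  induction m with
  | zero =>
    rw [Nat.cast_zero, PySem.List.pyRange_one_eq_nil (le_refl 0)]
    rfl
  | succ m ih =>
    have hm' : m ≤ v.length := by omega
    have hmv : m < v.length := by omega
    have hcast : ((m+1 : Nat) : Int) = (m : Int) + 1 := by push_cast; ring
    rw [hcast, PySem.List.pyRange_one_succ_right (by omega : (0:Int) ≤ (m:Int)),
      List.foldl_append, ih hm', List.foldl_cons, List.foldl_nil]
    by_cases hz : v.getD m 0 = 0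
    · have hfwd : izFwd v m = 0 := izFwd_of_zero v hz
      simp only [izStepF, PySem.List.pyGetD_natCast, PySem.List.pySetD_natCast, hz]
      simp only [if_true]
      rw [if_neg (by simp)]
      refine Prod.ext ?_ ?_
      · exact izArrF_set v hmv hfwd.symm
      · show (m : Int) = izLZ v (m+1)
        simp only [izLZ]; rw [if_pos hz]
    · simp only [izStepF, PySem.List.pyGetD_natCast, PySem.List.pySetD_natCast]
      rw [if_neg hz]
      by_cases hp : izLZ v m = -1
      · rw [if_neg (by simp [hp])]
        refine Prod.ext ?_ ?_
        · show izArrF v m = izArrF v (m+1)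
          refine (izArrF_succ_const v ?_).symm
          rw [izFwd, izLZ_succ_of_ne v hz, if_pos hp]
        · show izLZ v m = izLZ v (m+1)
          exact (izLZ_succ_of_ne v hz).symm
      · rw [if_pos ⟨hz, hp⟩]
        refine Prod.ext ?_ ?_
        · show (izArrF v m).set (((m:Int)).toNat) _ = izArrF v (m+1)
          rw [show ((m:Int)).toNat = m from by omega]
          refine izArrF_set v hmv ?_
          rw [izArrF_get v hmv, izFwd, izLZ_succ_of_ne v hz, if_neg hp]
        · show izLZ v m = izLZ v (m+1)
          exact (izLZ_succ_of_ne v hz).symm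

-- backward pass: A's second loop turns izArrB m into izArrB 0
theorem izFoldB (v : List Int) (m : Nat) (hm : m ≤ v.length) :
    (PySem.List.pyRange ((m : Int) - 1) (-1) (-1)).foldl (izStepB v) (izArrB v m, izNZ v m)
      = (izArrB v 0, izNZ v 0) := by
  induction m with
  | zero =>
    rw [Nat.cast_zero, show ((0:Int) - 1 = -1) from by ring,
      PySem.List.pyRange_neg_one_eq_nil (le_refl (-1))]
    rfl
  | succ m ih =>
    have hm' : m ≤ v.length := by omega
    have hmv : m < v.length := by omega
    have hcast : ((m+1 : Nat) : Int) - 1 = (m : Int) := by push_cast; ring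
    rw [hcast, PySem.List.pyRange_neg_one_cons (by omega : (-1:Int) < (m:Int)),
      List.foldl_cons]
    have hnz : izNZ v m = if v.getD m 0 = 0 then (m : Int) else izNZ v (m+1) := by
      rw [izNZ, dif_pos hmv]
    have hstep : izStepB v (izArrB v (m+1), izNZ v (m+1)) (m : Int) = (izArrB v m, izNZ v m) := by
      by_cases hz : v.getD m 0 = 0
      · simp only [izStepB, PySem.List.pyGetD_natCast, PySem.List.pySetD_natCast, hz]
        rw [if_neg (by simp)]
        refine Prod.ext ?_ ?_
        · show izArrB v (m+1) = izArrB v m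
          refine (izArrB_pred_const v ?_).symm
          have hq : izNZ v m = (m : Int) := by rw [hnz, if_pos hz]
          rw [izB, hq, if_neg (by omega), izFwd_of_zero v hz]
          have : (m : Int) - m = 0 := by omega
          rw [this]
          omega
        · show (m : Int) = izNZ v m
          rw [hnz, if_pos hz]
      · simp only [izStepB, PySem.List.pyGetD_natCast, PySem.List.pySetD_natCast]
        rw [if_neg hz]
        have hq : izNZ v m = izNZ v (m+1) := by rw [hnz, if_neg hz]
        by_cases hn : izNZ v (m+1) = -1
        · rw [if_neg (by simp [hn])]
          refine Prod.ext ?_ ?_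
          · show izArrB v (m+1) = izArrB v m
            refine (izArrB_pred_const v ?_).symm
            rw [izB, hq, if_pos hn]
          · show izNZ v (m+1) = izNZ v m
            exact hq.symm
        · rw [if_pos ⟨hz, hn⟩]
          refine Prod.ext ?_ ?_
          · show (izArrB v (m+1)).set (((m:Int)).toNat) _ = izArrB v m
            rw [show ((m:Int)).toNat = m from by omega]
            refine izArrB_set v hmv ?_
            rw [izArrB_get v hmv, izB, hq, if_neg hn]
          · show izNZ v (m+1) = izNZ v m
            exact hq.symm
    rw [hstep]
    exact ih hm' 

theorem izInit (v : List Int) :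
    (PySem.List.pyRange 0 ((v.length : Nat) : Int) 1).map (fun _ => ((1 <<< 30 : Int)))
      = izArrF v 0 := by
  apply List.ext_getElem
  · simp [izArrF, PySem.List.length_pyRange_one]
  · intro i h1 h2
    simp [izArrF]

theorem izA_eq (v : List Int) :
    infected_zeroes v =
      match PySem.List.max? ((List.range v.length).map (fun i => izB v i)) (fun y => y) with
      | some m => m
      | none => 0 := by
  simp only [infected_zeroes]
  rw [izInit v, izFoldF v v.length (le_refl _)]
  have h1 : (izArrF v v.length, izLZ v v.length).1 = izArrB v v.length := izArrFB v
  have hfb := izFoldB v v.length (le_refl _)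
  rw [izNZ_len v] at hfb
  rw [h1, hfb]
  rw [show (izArrB v 0, izNZ v 0).1 = izArrB v 0 from rfl, izArrB_zero v]

theorem izFwd_le_C (v : List Int) (i : Nat) : izFwd v i ≤ (1 <<< 30) := by
  rw [izFwd]
  split
  · exact le_refl _
  · exact min_le_left _ _

theorem izB_le_C (v : List Int) (i : Nat) : izB v i ≤ (1 <<< 30) := by
  rw [izB]
  split
  · exact izFwd_le_C v i
  · exact le_trans (min_le_left _ _) (izFwd_le_C v i)

theorem izB_eq_min (v : List Int) (i : Nat) (h : ¬(izLZ v (i+1) = -1 ∧ izNZ v i = -1)) :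
    izB v i = min ((1 <<< 30 : Int)) (izD v i) := by
  rw [izB, izFwd, izD]
  by_cases h1 : izLZ v (i+1) = -1
  · rw [if_pos h1, if_pos h1]
    have h2 : ¬ izNZ v i = -1 := fun h2 => h ⟨h1, h2⟩
    rw [if_neg h2]
  · rw [if_neg h1, if_neg h1]
    by_cases h2 : izNZ v i = -1
    · rw [if_pos h2, if_pos h2]
    · rw [if_neg h2, if_neg h2, min_assoc]

-- a zero exists, so at every index at least one side pointer is set
theorem iz_not_both (v : List Int) {k : Nat} (hk : k < v.length) (hz : v.getD k 0 = 0)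
    (i : Nat) : ¬(izLZ v (i+1) = -1 ∧ izNZ v i = -1) := by
  rintro ⟨h1, h2⟩
  by_cases hki : k < i + 1
  · have := izLZ_ge v hki hz
    omega
  · have := (izNZ_le v (by omega : i ≤ k) hk hz).1
    exact this h2

theorem izZ_min (v : List Int) {z0 : Int} {zs : List Int} (hZ : izZ v = z0 :: zs)
    {z : Int} (hz : z ∈ izZ v) : z0 ≤ z := by
  have hp := izZ_pairwise v
  rw [hZ] at hp hz
  rcases List.mem_cons.mp hz with rfl | hz'
  · exact le_refl z
  · exact le_of_lt ((List.pairwise_cons.mp hp).1 z hz')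

theorem izZ_max (v : List Int) {z0 : Int} {zs : List Int} (hZ : izZ v = z0 :: zs)
    {z : Int} (hz : z ∈ izZ v) : z ≤ (z0 :: zs).getLast (by simp) := by
  have hp := izZ_pairwise v
  rw [hZ] at hp hz
  exact pairwise_le_getLast hp (by simp) hz

theorem izB_empty (v : List Int) (hZ : izZ v = []) {i : Nat} (hi : i < v.length) :
    izB v i = (1 <<< 30) := by
  have h1 : izLZ v (i+1) = -1 := by
    rcases izLZ_cases v (i+1) with h | ⟨p, hp, hpm, hpz⟩
    · exact h
    · exfalso
      have : (p : Int) ∈ izZ v := (mem_izZ v _).mpr ⟨p, by omega, rfl, hpz⟩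
      rw [hZ] at this
      simp at this
  have h2 : izNZ v i = -1 := by
    rcases izNZ_cases v i with h | ⟨q, hq, hiq, hqn, hqz⟩
    · exact h
    · exfalso
      have : (q : Int) ∈ izZ v := (mem_izZ v _).mpr ⟨q, hqn, rfl, hqz⟩
      rw [hZ] at this
      simp at this
  rw [izB, if_pos h2, izFwd, if_pos h1]

-- every distance is bounded by one of B's candidates
theorem izD_le_cand (v : List Int) {z0 : Int} {zs : List Int} (hZ : izZ v = z0 :: zs)
    {i : Nat} (hi : i < v.length) :
    ∃ c ∈ (z0 :: (((v.length : Int) - 1) - (z0 :: zs).getLast (by simp)) ::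
        ((z0 :: zs).zip zs).map (fun ab => PySem.Int.floordiv (ab.2 - ab.1) 2)),
      izD v i ≤ c := by
  have hp := izZ_pairwise v
  have hz0m : z0 ∈ izZ v := by rw [hZ]; simp
  obtain ⟨k0, hk0n, hk0e, hk0z⟩ := (mem_izZ v z0).mp hz0m
  have hlastm : (z0 :: zs).getLast (by simp) ∈ izZ v := by
    rw [hZ]; exact List.getLast_mem _
  obtain ⟨kl, hkln, hkle, hklz⟩ := (mem_izZ v _).mp hlastm
  rcases izLZ_cases v (i+1) with h1 | ⟨pn, hpe, hpm, hpz⟩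
  · rcases izNZ_cases v i with h2 | ⟨qn, hqe, hiq, hqn, hqz⟩
    · exact absurd ⟨h1, h2⟩ (iz_not_both v hk0n hk0z i)
    · refine ⟨z0, by simp, ?_⟩
      have hd : izD v i = izNZ v i - (i : Int) := by rw [izD, if_pos h1]
      have hk0i : ¬ k0 < i + 1 := fun hc => by
        have := izLZ_ge v hc hk0z; omega
      have hqle := (izNZ_le v (by omega : i ≤ k0) hk0n hk0z).2
      rw [hd, hk0e]
      omega
  · rcases izNZ_cases v i with h2 | ⟨qn, hqe, hiq, hqn, hqz⟩
    · refine ⟨((v.length : Int) - 1) - (z0 :: zs).getLast (by simp), by simp, ?_⟩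
      have hd : izD v i = (i : Int) - izLZ v (i+1) := by
        rw [izD, if_neg (by rw [hpe]; omega), if_pos h2]
      have hkli : kl < i := by
        by_contra hc
        rw [not_lt] at hc
        exact (izNZ_le v (by omega : i ≤ kl) hkln hklz).1 h2
      have hplast : (kl : Int) ≤ izLZ v (i+1) := izLZ_ge v (by omega) hklz
      have hple : izLZ v (i+1) ≤ (i : Int) := by rw [hpe]; omega
      rw [hd, hkle]
      omega
    · by_cases hpq : pn = qn
      · refine ⟨z0, by simp, ?_⟩
        have hd : izD v i = min ((i : Int) - izLZ v (i+1)) (izNZ v i - (i : Int)) := by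
          rw [izD, if_neg (by rw [hpe]; omega), if_neg (by rw [hqe]; omega)]
        rw [hd, hpe, hqe, hk0e]
        omega
      · have hplt : (pn : Int) < (qn : Int) := by omega
        have hpmem : (pn : Int) ∈ izZ v := (mem_izZ v _).mpr ⟨pn, by omega, rfl, hpz⟩
        have hqmem : (qn : Int) ∈ izZ v := (mem_izZ v _).mpr ⟨qn, hqn, rfl, hqz⟩
        have hno : ∀ z ∈ izZ v, ¬((pn : Int) < z ∧ z < (qn : Int)) := by
          rintro z hzm ⟨ha, hb⟩
          obtain ⟨kz, hkzn, rfl, hkzz⟩ := (mem_izZ v z).mp hzm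
          by_cases hc : kz < i + 1
          · have := izLZ_ge v hc hkzz
            rw [hpe] at this
            omega
          · have := (izNZ_le v (by omega : i ≤ kz) hkzn hkzz).2
            rw [hqe] at this
            omega
        have hadj := pairwise_adj hp hpmem hqmem hplt hno
        rw [hZ] at hadj
        simp only [List.tail_cons] at hadj
        refine ⟨PySem.Int.floordiv ((qn : Int) - (pn : Int)) 2,
          List.mem_cons_of_mem _ (List.mem_cons_of_mem _
            (List.mem_map.mpr ⟨((pn : Int), (qn : Int)), hadj, rfl⟩)), ?_⟩
        have hd : izD v i = min ((i : Int) - izLZ v (i+1)) (izNZ v i - (i : Int)) := by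
          rw [izD, if_neg (by rw [hpe]; omega), if_neg (by rw [hqe]; omega)]
        rw [hd, hpe, hqe, PySem.Int.floordiv_eq_ediv_of_pos (by norm_num)]
        omega

-- every candidate of B is realised as a distance
theorem cand_achieved (v : List Int) {z0 : Int} {zs : List Int} (hZ : izZ v = z0 :: zs)
    {c : Int}
    (hc : c ∈ (z0 :: (((v.length : Int) - 1) - (z0 :: zs).getLast (by simp)) ::
        ((z0 :: zs).zip zs).map (fun ab => PySem.Int.floordiv (ab.2 - ab.1) 2))) :
    ∃ i : Nat, i < v.length ∧ izD v i = c := by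
  have hp := izZ_pairwise v
  have hz0m : z0 ∈ izZ v := by rw [hZ]; simp
  obtain ⟨k0, hk0n, hk0e, hk0z⟩ := (mem_izZ v z0).mp hz0m
  have hlastm : (z0 :: zs).getLast (by simp) ∈ izZ v := by
    rw [hZ]; exact List.getLast_mem _
  obtain ⟨kl, hkln, hkle, hklz⟩ := (mem_izZ v _).mp hlastm
  have hlen : 0 < v.length := by omega
  rcases List.mem_cons.mp hc with hce | hc1
  · -- c = z0, realised at index 0
    rw [hce]
    refine ⟨0, hlen, ?_⟩
    by_cases h0 : v.getD 0 0 = 0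
    · have h0m : (0 : Int) ∈ izZ v := (mem_izZ v _).mpr ⟨0, hlen, by simp, h0⟩
      have hz00 : z0 = 0 := by
        have := izZ_min v hZ h0m
        rw [hk0e] at this ⊢
        omega
      have hlz : izLZ v (0 + 1) = ((0 : Nat) : Int) := by
        simp only [izLZ]; rw [if_pos h0]
      have hnz : izNZ v 0 = ((0 : Nat) : Int) := by
        rw [izNZ, dif_pos hlen, if_pos h0]
      rw [izD, hlz, hnz]
      rw [if_neg (by omega)]
      try rw [if_neg (by omega)]
      omega
    · have hlz : izLZ v (0 + 1) = -1 := by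
        simp only [izLZ]; rw [if_neg h0]
      have hq := izNZ_le v (by omega : 0 ≤ k0) hk0n hk0z
      rcases izNZ_cases v 0 with h2 | ⟨qn, hqe, _, hqn, hqz⟩
      · exact absurd h2 hq.1
      · have hqm : (qn : Int) ∈ izZ v := (mem_izZ v _).mpr ⟨qn, hqn, rfl, hqz⟩
        have hq1 := izZ_min v hZ hqm
        have hq2 := hq.2
        rw [hqe] at hq2
        rw [hk0e] at hq1
        rw [izD, if_pos hlz, hqe, hk0e]
        omega
  rcases List.mem_cons.mp hc1 with hce | hc2
  · -- c = (n-1) - last, realised at index n-1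
    rw [hce]
    refine ⟨v.length - 1, by omega, ?_⟩
    have hicast : ((v.length - 1 : Nat) : Int) = (v.length : Int) - 1 := by omega
    have hsucc : v.length - 1 + 1 = v.length := by omega
    have hlzlast : izLZ v v.length = (kl : Int) := by
      have hge : (kl : Int) ≤ izLZ v v.length := izLZ_ge v hkln hklz
      rcases izLZ_cases v v.length with h | ⟨pn, hpe, hpm, hpz⟩
      · omega
      · have hpmem : (pn : Int) ∈ izZ v := (mem_izZ v _).mpr ⟨pn, hpm, rfl, hpz⟩
        have := izZ_max v hZ hpmem
        rw [hkle] at this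
        rw [hpe] at hge ⊢
        omega
    by_cases hnl : v.getD (v.length - 1) 0 = 0
    · have hmem : ((v.length - 1 : Nat) : Int) ∈ izZ v :=
        (mem_izZ v _).mpr ⟨v.length - 1, by omega, rfl, hnl⟩
      have hle1 := izZ_max v hZ hmem
      rw [hkle] at hle1
      have hnz : izNZ v (v.length - 1) = ((v.length - 1 : Nat) : Int) := by
        rw [izNZ, dif_pos (by omega), if_pos hnl]
      have hlz : izLZ v (v.length - 1 + 1) = (kl : Int) := by rw [hsucc]; exact hlzlast
      rw [izD, hlz, hnz, hkle]
      have : ¬ ((kl : Int) = -1) := by omega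
      rw [if_neg this, if_neg (by omega)]
      omega
    · have hnz : izNZ v (v.length - 1) = -1 := by
        rw [izNZ, dif_pos (by omega), if_neg hnl, hsucc, izNZ_len]
      have hlz : izLZ v (v.length - 1 + 1) = (kl : Int) := by rw [hsucc]; exact hlzlast
      rw [izD, hlz, hkle]
      rw [if_neg (by omega), if_pos hnz]
      omega
  · -- c is a half-gap
    obtain ⟨⟨a, b⟩, habm, rfl⟩ := List.mem_map.mp hc2
    have hzip : (a, b) ∈ (izZ v).zip (izZ v).tail := by
      rw [hZ]; simpa using habm
    obtain ⟨hab, hno⟩ := adj_no_between hp hzip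
    have hmem2 := List.of_mem_zip hzip
    have ham : a ∈ izZ v := hmem2.1
    have hbm : b ∈ izZ v := List.mem_of_mem_tail hmem2.2
    obtain ⟨ka, hkan, rfl, hkaz⟩ := (mem_izZ v a).mp ham
    obtain ⟨kb, hkbn, rfl, hkbz⟩ := (mem_izZ v b).mp hbm
    have hdiv : PySem.Int.floordiv ((kb : Int) - (ka : Int)) 2 = ((kb : Int) - (ka : Int)) / 2 :=
      PySem.Int.floordiv_eq_ediv_of_pos (by norm_num)
    have hkab : ka < kb := by exact_mod_cast hab
    by_cases hg0 : ((kb : Int) - (ka : Int)) / 2 = 0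
    · refine ⟨ka, by omega, ?_⟩
      have hlz : izLZ v (ka + 1) = (ka : Int) := by
        simp only [izLZ]; rw [if_pos hkaz]
      have hnz : izNZ v ka = (ka : Int) := by
        rw [izNZ, dif_pos (by omega), if_pos hkaz]
      rw [izD, hlz, hnz, if_neg (by omega), if_neg (by omega), hdiv]
      omega
    · set g : Int := ((kb : Int) - (ka : Int)) / 2 with hgdef
      have hg1 : 0 < g := by
        have : (0 : Int) ≤ g := by rw [hgdef]; omega
        omega
      have hglt : g < (kb : Int) - (ka : Int) := by omega
      refine ⟨ka + g.toNat, by omega, ?_⟩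
      have hicast : ((ka + g.toNat : Nat) : Int) = (ka : Int) + g := by omega
      have hvi : ¬ v.getD (ka + g.toNat) 0 = 0 := by
        intro hzz
        have hm : ((ka + g.toNat : Nat) : Int) ∈ izZ v :=
          (mem_izZ v _).mpr ⟨ka + g.toNat, by omega, rfl, hzz⟩
        exact hno _ hm ⟨by omega, by omega⟩
      have hlz : izLZ v (ka + g.toNat + 1) = (ka : Int) := by
        have hge : (ka : Int) ≤ izLZ v (ka + g.toNat + 1) := izLZ_ge v (by omega) hkaz
        rcases izLZ_cases v (ka + g.toNat + 1) with h | ⟨pn, hpe, hpm, hpz⟩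
        · omega
        · have hpmem : (pn : Int) ∈ izZ v := (mem_izZ v _).mpr ⟨pn, by omega, rfl, hpz⟩
          have := hno _ hpmem
          rw [hpe] at hge ⊢
          by_contra hne
          exact this ⟨by omega, by omega⟩
      have hnz : izNZ v (ka + g.toNat) = (kb : Int) := by
        have hle := izNZ_le v (by omega : ka + g.toNat ≤ kb) hkbn hkbz
        rcases izNZ_cases v (ka + g.toNat) with h | ⟨qn, hqe, hiq, hqn, hqz⟩
        · exact absurd h hle.1
        · have hqmem : (qn : Int) ∈ izZ v := (mem_izZ v _).mpr ⟨qn, hqn, rfl, hqz⟩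
          have := hno _ hqmem
          rw [hqe] at hle ⊢
          by_contra hne
          exact this ⟨by omega, by omega⟩
      rw [izD, hlz, hnz, if_neg (by omega), if_neg (by omega), hdiv]
      omega

-- B's port, re-expressed through izZ (definitional)
theorem izAlt_eq (v : List Int) :
    infected_zeroes_alt v =
      if izZ v = [] then ((1 <<< 30 : Int))
      else
        min (match PySem.List.max?
            (PySem.List.pyGetD (izZ v) 0 0 ::
              (((v.length : Int) - 1) - PySem.List.pyGetD (izZ v) (-1) 0) ::
              ((izZ v).zip (PySem.List.slice (izZ v) (some 1) none)).map
                (fun ab => PySem.Int.floordiv (ab.2 - ab.1) 2)) (fun y => y) with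
          | some m => m
          | none => 0) ((1 <<< 30 : Int)) := rfl

-- ===== VERDICT (by name: the statement is the Claim_ definition above) =====
theorem infected_zeroes_spec : Claim_equal_infected_zeroes := by
  intro v _ hpre
  unfold Spec_infected_zeroes
  have hlen : 0 < v.length := List.length_pos_iff.mpr hpre
  rw [izA_eq, izAlt_eq]
  rcases hzz : izZ v with _ | ⟨z0, zs⟩
  · -- no zeros: every entry is the sentinel
    rw [if_pos rfl]
    rcases hma : PySem.List.max? ((List.range v.length).map (fun i => izB v i)) (fun y => y)
      with _ | a
    · exfalso
      have := (PySem.List.max?_eq_none_iff _ _).mp hma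
      rw [List.map_eq_nil_iff, List.range_eq_nil] at this
      omega
    · have ham := PySem.List.max?_mem hma
      obtain ⟨i, hi, hie⟩ := List.mem_map.mp ham
      rw [← hie]
      exact izB_empty v hzz (List.mem_range.mp hi)
  · rw [if_neg (by simp)]
    -- names for B's candidate list
    rw [show PySem.List.pyGetD (z0 :: zs) 0 0 = z0 from PySem.List.pyGetD_zero_cons ..,
      PySem.List.pyGetD_neg_one (xs := z0 :: zs) (h := by simp),
      PySem.List.slice_from_one]
    simp only [List.tail_cons]
    have hz0m : z0 ∈ izZ v := by rw [hzz]; simp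
    obtain ⟨k0, hk0n, hk0e, hk0z⟩ := (mem_izZ v z0).mp hz0m
    rcases hma : PySem.List.max? ((List.range v.length).map (fun i => izB v i)) (fun y => y)
      with _ | a
    · exfalso
      have := (PySem.List.max?_eq_none_iff _ _).mp hma
      rw [List.map_eq_nil_iff, List.range_eq_nil] at this
      omega
    rcases hmb : PySem.List.max?
        (z0 :: (((v.length : Int) - 1) - (z0 :: zs).getLast (by simp) ) ::
          ((z0 :: zs).zip zs).map (fun ab => PySem.Int.floordiv (ab.2 - ab.1) 2))
        (fun y => y) with _ | b
    · exact absurd ((PySem.List.max?_eq_none_iff _ _).mp hmb) (by simp)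
    have ham := PySem.List.max?_mem hma
    obtain ⟨i, hi', hie⟩ := List.mem_map.mp ham
    have hi : i < v.length := List.mem_range.mp hi'
    have hamax := PySem.List.max?_isMax hma
    have hbm := PySem.List.max?_mem hmb
    have hbmax := PySem.List.max?_isMax hmb
    simp only [hmb]
    apply le_antisymm
    · -- a ≤ min b C
      have h1 : a ≤ (1 <<< 30) := hie ▸ izB_le_C v i
      have h2 : a ≤ b := by
        obtain ⟨c, hcm, hcle⟩ := izD_le_cand v hzz hi
        have hcb : c ≤ b := hbmax c hcm
        have heq : izB v i = min ((1 <<< 30 : Int)) (izD v i) :=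
          izB_eq_min v i (iz_not_both v hk0n hk0z i)
        rw [← hie, heq]
        calc min ((1 <<< 30 : Int)) (izD v i) ≤ izD v i := min_le_right _ _
          _ ≤ c := hcle
          _ ≤ b := hcb
      exact le_min h2 h1
    · -- min b C ≤ a
      obtain ⟨j, hj, hdj⟩ := cand_achieved v hzz hbm
      have heq : izB v j = min ((1 <<< 30 : Int)) (izD v j) :=
        izB_eq_min v j (iz_not_both v hk0n hk0z j)
      have hmem : izB v j ∈ (List.range v.length).map (fun i => izB v i) :=
        List.mem_map.mpr ⟨j, List.mem_range.mpr hj, rfl⟩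
      have hja : izB v j ≤ a := hamax _ hmem
      rw [heq, hdj] at hja
      omega
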